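-- pv_equiv track=rewrite | github.com/daniel-reich/turbo-robot | 68omQmgQEwv8558ZK_2.py | max_stats
-- ===== SOURCE A (Python) =====
-- def max_stats(character, gold):
--     cha = {'Knight': (120, 140, 6), 'Warrior': (180, 71, 8), 'Fairy': (71, 100, 16), 'Robot': (160, 120, 11), 'Giant': (160, 200, 4)}
--     wea = {'sis': (10, 20), 'kat': (20, 40), 'shs': (30, 60), 'grs': (40, 80), 'fos': (50, 100)}
--     arm = {'bra': (20, 30), 'ira': (40, 60), 'sta': (60, 90), 'oba': (80, 120), 'dra': (100, 150)}
--     boo = {'sib': (3, 24), 'lea': (6, 48), 'stb': (9, 72), 'cob': (12, 96), 'sob': (15, 120)}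
--     sta = tuple([i for i in cha[character]])
--     max_wea = sorted([(wea[i][0], gold-wea[i][1]) for i in wea if gold-wea[i][1] >= 0], key = lambda x: x[1])[0][0]
--     max_arm = sorted([(arm[i][0], gold-arm[i][1]) for i in arm if gold-arm[i][1] >= 0], key = lambda x: x[1])[0][0]
--     max_boo = sorted([(boo[i][0], gold-boo[i][1]) for i in boo if gold-boo[i][1] >= 0], key = lambda x: x[1])[0][0]
--     return [sta[0]+max_wea, sta[1]+max_arm, sta[2]+max_boo]
-- ===== SOURCE B (Python) =====
-- def max_stats(character, gold):
--     cha = {'Knight': (120, 140, 6), 'Warrior': (180, 71, 8), 'Fairy': (71, 100, 16), 'Robot': (160, 120, 11), 'Giant': (160, 200, 4)}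
--     gear = (
--         [(20, 10), (40, 20), (60, 30), (80, 40), (100, 50)],    # weapons: (price, stat)
--         [(30, 20), (60, 40), (90, 60), (120, 80), (150, 100)],  # armour
--         [(24, 3), (48, 6), (72, 9), (96, 12), (120, 15)],       # boots
--     )
--     return [base + max(stat for price, stat in items if price <= gold)
--             for base, items in zip(cha[character], gear)]
-- ===== Notes on version B (the rewrite author's own statement) =====
-- stated objective: simpler
-- what changed: Instead of building (stat, leftover-gold) pairs per gear dict, sorting them by leftover and taking the head, B stores each gear category as a price-stat list and takes a single max() over the affordable stats; the three identical sort lines collapse into one comprehension over zip(cha[character], gear).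
import Mathlib
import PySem

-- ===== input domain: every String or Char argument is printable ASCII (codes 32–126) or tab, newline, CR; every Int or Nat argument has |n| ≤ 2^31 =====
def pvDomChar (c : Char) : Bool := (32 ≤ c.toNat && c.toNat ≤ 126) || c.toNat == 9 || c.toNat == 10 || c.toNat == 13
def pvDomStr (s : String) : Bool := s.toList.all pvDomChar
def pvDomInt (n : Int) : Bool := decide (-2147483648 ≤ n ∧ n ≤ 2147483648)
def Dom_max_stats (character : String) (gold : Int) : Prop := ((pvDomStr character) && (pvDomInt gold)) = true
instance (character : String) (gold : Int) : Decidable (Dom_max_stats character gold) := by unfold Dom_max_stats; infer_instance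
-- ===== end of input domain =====

-- B replaces sort-each-gear-list-by-leftover-gold-and-take-first with a single max selection
-- over price-stat lists (objective: simpler); equal on Pre_ (known character, gold ≥ 30 —
-- outside it A raises KeyError/IndexError and B raises KeyError/ValueError).

-- ===== PORT A =====
def pvChaA : PySem.Dict String (Int × Int × Int) :=
  PySem.Dict.mk [("Knight",(120,140,6)),("Warrior",(180,71,8)),("Fairy",(71,100,16)),
                 ("Robot",(160,120,11)),("Giant",(160,200,4))]
def pvWeaA : PySem.Dict String (Int × Int) :=
  PySem.Dict.mk [("sis",(10,20)),("kat",(20,40)),("shs",(30,60)),("grs",(40,80)),("fos",(50,100))]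
def pvArmA : PySem.Dict String (Int × Int) :=
  PySem.Dict.mk [("bra",(20,30)),("ira",(40,60)),("sta",(60,90)),("oba",(80,120)),("dra",(100,150))]
def pvBooA : PySem.Dict String (Int × Int) :=
  PySem.Dict.mk [("sib",(3,24)),("lea",(6,48)),("stb",(9,72)),("cob",(12,96)),("sob",(15,120))]

-- sorted([(d[i][0], gold-d[i][1]) for i in d if gold-d[i][1] >= 0], key=lambda x: x[1])[0][0];
-- the three Python lines are this expression applied to wea/arm/boo ([0] on [] = IndexError, excluded by Pre_)
def pvMaxGearA (gold : Int) (d : PySem.Dict String (Int × Int)) : Int :=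
  (PySem.List.pyGetD
    (PySem.List.sorted
      ((d.keys.filter (fun i => decide (0 ≤ gold - (d.getD i (0,0)).2))).map
        (fun i => ((d.getD i (0,0)).1, gold - (d.getD i (0,0)).2)))
      (fun x => x.2) false)
    0 (0,0)).1

def max_stats (character : String) (gold : Int) : List Int :=
  let sta := pvChaA.getD character (0,0,0)  -- cha[character]; KeyError excluded by Pre_
  let max_wea := pvMaxGearA gold pvWeaA
  let max_arm := pvMaxGearA gold pvArmA
  let max_boo := pvMaxGearA gold pvBooA
  [sta.1 + max_wea, sta.2.1 + max_arm, sta.2.2 + max_boo]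

-- ===== PORT B =====
def pvChaB : PySem.Dict String (Int × Int × Int) :=
  PySem.Dict.mk [("Knight",(120,140,6)),("Warrior",(180,71,8)),("Fairy",(71,100,16)),
                 ("Robot",(160,120,11)),("Giant",(160,200,4))]
def pvGearB : List (List (Int × Int)) :=
  [[(20,10),(40,20),(60,30),(80,40),(100,50)],
   [(30,20),(60,40),(90,60),(120,80),(150,100)],
   [(24,3),(48,6),(72,9),(96,12),(120,15)]]

-- max(stat for price, stat in items if price <= gold)  (max() on empty = ValueError, excluded by Pre_)
def pvBest (gold : Int) (items : List (Int × Int)) : Int :=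
  (PySem.List.max? ((items.filter (fun p => decide (p.1 ≤ gold))).map (fun p => p.2))
    (fun x => x)).getD 0

def max_stats_alt (character : String) (gold : Int) : List Int :=
  let base := pvChaB.getD character (0,0,0)  -- cha[character]; KeyError excluded by Pre_
  (List.zip [base.1, base.2.1, base.2.2] pvGearB).map (fun p => p.1 + pvBest gold p.2)

-- ===== PRECONDITION & SPEC =====
-- Pre_ = exactly where A returns: a known character name and gold ≥ 30 (the cheapest armour);
-- otherwise A raises KeyError resp. IndexError (and B raises KeyError resp. ValueError).
def Pre_max_stats (character : String) (gold : Int) : Prop :=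
  (character = "Knight" ∨ character = "Warrior" ∨ character = "Fairy" ∨
   character = "Robot" ∨ character = "Giant") ∧ 30 ≤ gold
instance (character : String) (gold : Int) : Decidable (Pre_max_stats character gold) := by
  unfold Pre_max_stats; infer_instance
def pvWitness_max_stats : String × Int := ("Knight", 100)

def Spec_max_stats (character : String) (gold : Int) (out : List Int) : Prop :=
  out = max_stats_alt character gold
instance (character : String) (gold : Int) (out : List Int) :
    Decidable (Spec_max_stats character gold out) := by unfold Spec_max_stats; infer_instance

-- ===== CLAIM (what is proved, stated in full; the proofs are below) =====
def Claim_equal_max_stats : Prop := ∀ (character : String) (gold : Int),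
  Dom_max_stats character gold → Pre_max_stats character gold →
  Spec_max_stats character gold (max_stats character gold)

-- ===== LEMMAS AND PROOFS =====
-- A list whose keys strictly decrease is sorted by reversing it.
theorem pv_sorted_desc (l : List (Int × Int)) (h : l.Pairwise (fun a b => b.2 < a.2)) :
    PySem.List.sorted l (fun x => x.2) false = l.reverse :=
  PySem.List.sorted_eq_of_perm_of_pairwise_lt l l.reverse _ l.reverse_perm
    (by rw [List.pairwise_reverse]; exact h)

theorem pv_wea_eq (gold : Int) (h : 30 ≤ gold) :
    pvMaxGearA gold pvWeaA = pvBest gold [(20,10),(40,20),(60,30),(80,40),(100,50)] := by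
  rw [pvMaxGearA, pvBest]
  rcases lt_or_ge gold 40 with h1 | h1
  · simp [pvWeaA, PySem.Dict.getD, PySem.Dict.get?_mk_cons, PySem.Dict.keys_mk,
      show ¬ (40:Int) ≤ gold by omega, show ¬ (60:Int) ≤ gold by omega,
      show ¬ (80:Int) ≤ gold by omega, show ¬ (100:Int) ≤ gold by omega,
      show (20:Int) ≤ gold by omega]
      <;> rw [pv_sorted_desc _ (by simp <;> omega)] <;> simp [PySem.List.max?, PySem.List.pyGetD]
  · rcases lt_or_ge gold 60 with h2 | h2
    · simp [pvWeaA, PySem.Dict.getD, PySem.Dict.get?_mk_cons, PySem.Dict.keys_mk, h1,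
        show ¬ (60:Int) ≤ gold by omega, show ¬ (80:Int) ≤ gold by omega,
        show ¬ (100:Int) ≤ gold by omega, show (20:Int) ≤ gold by omega]
        <;> rw [pv_sorted_desc _ (by simp <;> omega)] <;> simp [PySem.List.max?, PySem.List.pyGetD]
    · rcases lt_or_ge gold 80 with h3 | h3
      · simp [pvWeaA, PySem.Dict.getD, PySem.Dict.get?_mk_cons, PySem.Dict.keys_mk, h1, h2,
          show ¬ (80:Int) ≤ gold by omega, show ¬ (100:Int) ≤ gold by omega,
          show (20:Int) ≤ gold by omega]
          <;> rw [pv_sorted_desc _ (by simp <;> omega)] <;> simp [PySem.List.max?, PySem.List.pyGetD]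
      · rcases lt_or_ge gold 100 with h4 | h4
        · simp [pvWeaA, PySem.Dict.getD, PySem.Dict.get?_mk_cons, PySem.Dict.keys_mk, h1, h2, h3,
            show ¬ (100:Int) ≤ gold by omega, show (20:Int) ≤ gold by omega]
            <;> rw [pv_sorted_desc _ (by simp <;> omega)] <;> simp [PySem.List.max?, PySem.List.pyGetD]
        · simp [pvWeaA, PySem.Dict.getD, PySem.Dict.get?_mk_cons, PySem.Dict.keys_mk, h1, h2, h3, h4,
            show (20:Int) ≤ gold by omega]
            <;> rw [pv_sorted_desc _ (by simp <;> omega)] <;> simp [PySem.List.max?, PySem.List.pyGetD]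

theorem pv_arm_eq (gold : Int) (h : 30 ≤ gold) :
    pvMaxGearA gold pvArmA = pvBest gold [(30,20),(60,40),(90,60),(120,80),(150,100)] := by
  rw [pvMaxGearA, pvBest]
  rcases lt_or_ge gold 60 with h1 | h1
  · simp [pvArmA, PySem.Dict.getD, PySem.Dict.get?_mk_cons, PySem.Dict.keys_mk, h,
      show ¬ (60:Int) ≤ gold by omega, show ¬ (90:Int) ≤ gold by omega,
      show ¬ (120:Int) ≤ gold by omega, show ¬ (150:Int) ≤ gold by omega]
      <;> rw [pv_sorted_desc _ (by simp <;> omega)] <;> simp [PySem.List.max?, PySem.List.pyGetD]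
  · rcases lt_or_ge gold 90 with h2 | h2
    · simp [pvArmA, PySem.Dict.getD, PySem.Dict.get?_mk_cons, PySem.Dict.keys_mk, h, h1,
        show ¬ (90:Int) ≤ gold by omega, show ¬ (120:Int) ≤ gold by omega,
        show ¬ (150:Int) ≤ gold by omega]
        <;> rw [pv_sorted_desc _ (by simp <;> omega)] <;> simp [PySem.List.max?, PySem.List.pyGetD]
    · rcases lt_or_ge gold 120 with h3 | h3
      · simp [pvArmA, PySem.Dict.getD, PySem.Dict.get?_mk_cons, PySem.Dict.keys_mk, h, h1, h2,
          show ¬ (120:Int) ≤ gold by omega, show ¬ (150:Int) ≤ gold by omega]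
          <;> rw [pv_sorted_desc _ (by simp <;> omega)] <;> simp [PySem.List.max?, PySem.List.pyGetD]
      · rcases lt_or_ge gold 150 with h4 | h4
        · simp [pvArmA, PySem.Dict.getD, PySem.Dict.get?_mk_cons, PySem.Dict.keys_mk, h, h1, h2, h3,
            show ¬ (150:Int) ≤ gold by omega]
            <;> rw [pv_sorted_desc _ (by simp <;> omega)] <;> simp [PySem.List.max?, PySem.List.pyGetD]
        · simp [pvArmA, PySem.Dict.getD, PySem.Dict.get?_mk_cons, PySem.Dict.keys_mk, h, h1, h2, h3, h4]
            <;> rw [pv_sorted_desc _ (by simp <;> omega)] <;> simp [PySem.List.max?, PySem.List.pyGetD]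

theorem pv_boo_eq (gold : Int) (h : 30 ≤ gold) :
    pvMaxGearA gold pvBooA = pvBest gold [(24,3),(48,6),(72,9),(96,12),(120,15)] := by
  rw [pvMaxGearA, pvBest]
  rcases lt_or_ge gold 48 with h1 | h1
  · simp [pvBooA, PySem.Dict.getD, PySem.Dict.get?_mk_cons, PySem.Dict.keys_mk,
      show ¬ (48:Int) ≤ gold by omega, show ¬ (72:Int) ≤ gold by omega,
      show ¬ (96:Int) ≤ gold by omega, show ¬ (120:Int) ≤ gold by omega,
      show (24:Int) ≤ gold by omega]
      <;> rw [pv_sorted_desc _ (by simp <;> omega)] <;> simp [PySem.List.max?, PySem.List.pyGetD]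
  · rcases lt_or_ge gold 72 with h2 | h2
    · simp [pvBooA, PySem.Dict.getD, PySem.Dict.get?_mk_cons, PySem.Dict.keys_mk, h1,
        show ¬ (72:Int) ≤ gold by omega, show ¬ (96:Int) ≤ gold by omega,
        show ¬ (120:Int) ≤ gold by omega, show (24:Int) ≤ gold by omega]
        <;> rw [pv_sorted_desc _ (by simp <;> omega)] <;> simp [PySem.List.max?, PySem.List.pyGetD]
    · rcases lt_or_ge gold 96 with h3 | h3
      · simp [pvBooA, PySem.Dict.getD, PySem.Dict.get?_mk_cons, PySem.Dict.keys_mk, h1, h2,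
          show ¬ (96:Int) ≤ gold by omega, show ¬ (120:Int) ≤ gold by omega,
          show (24:Int) ≤ gold by omega]
          <;> rw [pv_sorted_desc _ (by simp <;> omega)] <;> simp [PySem.List.max?, PySem.List.pyGetD]
      · rcases lt_or_ge gold 120 with h4 | h4
        · simp [pvBooA, PySem.Dict.getD, PySem.Dict.get?_mk_cons, PySem.Dict.keys_mk, h1, h2, h3,
            show ¬ (120:Int) ≤ gold by omega, show (24:Int) ≤ gold by omega]
            <;> rw [pv_sorted_desc _ (by simp <;> omega)] <;> simp [PySem.List.max?, PySem.List.pyGetD]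
        · simp [pvBooA, PySem.Dict.getD, PySem.Dict.get?_mk_cons, PySem.Dict.keys_mk, h1, h2, h3, h4,
            show (24:Int) ≤ gold by omega]
            <;> rw [pv_sorted_desc _ (by simp <;> omega)] <;> simp [PySem.List.max?, PySem.List.pyGetD]

-- ===== VERDICT (by name: the statement is the Claim_ definition above) =====
theorem max_stats_spec : Claim_equal_max_stats := by
  intro character gold _ hpre
  obtain ⟨hc, hg⟩ := hpre
  unfold Spec_max_stats
  rcases hc with hc | hc | hc | hc | hc <;> subst hc <;>
    simp [max_stats, max_stats_alt, pvChaA, pvChaB, pvGearB,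
      PySem.Dict.getD, PySem.Dict.get?_mk_cons,
      pv_wea_eq gold hg, pv_arm_eq gold hg, pv_boo_eq gold hg]
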